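-- pv_equiv track=rewrite | github.com/TatsuruHisanaga/kyopro-study | pk3.py | solution
-- ===== SOURCE A (Python) =====
-- def solution(blocks):
--     N = len(blocks)
--
--     # 各ブロックから右方向にどこまで到達できるかを保持する配列
--     right = [0] * N
--     for i in range(1, N):
--         if blocks[i] >= blocks[i - 1]:
--             right[i] = right[i - 1] + 1
--         else:
--             right[i] = 0
--
--     # 各ブロックから左方向にどこまで到達できるかを保持する配列
--     left = [0] * N
--     for i in range(N - 2, -1, -1):
--         if blocks[i] >= blocks[i + 1]:
--             left[i] = left[i + 1] + 1
--         else: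
--             left[i] = 0
--
--     # 可能な最大距離を計算
--     max_distance = 0
--     for i in range(N):
--         max_distance = max(max_distance, right[i] + left[i] + 1)
--
--     return max_distance
-- ===== SOURCE B (Python) =====
-- def solution(blocks):
--     # One forward pass, O(1) extra space: track the non-decreasing run length
--     # ending here (inc), the longest weakly-unimodal segment ending here (mnt),
--     # and the best seen so far.
--     if not blocks:
--         return 0
--     prev = blocks[0]
--     inc = 1
--     mnt = 1
--     best = 1
--     for x in blocks[1:]:
--         inc = inc + 1 if x >= prev else 1
--         mnt = max(inc, mnt + 1) if x <= prev else inc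
--         best = max(best, mnt)
--         prev = x
--     return best
-- ===== Notes on version B (the rewrite author's own statement) =====
-- stated objective: alternative
-- what changed: Replaced A's three passes (build a forward non-decreasing-run array, a backward non-increasing-run array, then combine) by a single forward pass keeping only O(1) state: the ascending-run length, the longest unimodal segment ending here, and a running best.
import Mathlib
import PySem

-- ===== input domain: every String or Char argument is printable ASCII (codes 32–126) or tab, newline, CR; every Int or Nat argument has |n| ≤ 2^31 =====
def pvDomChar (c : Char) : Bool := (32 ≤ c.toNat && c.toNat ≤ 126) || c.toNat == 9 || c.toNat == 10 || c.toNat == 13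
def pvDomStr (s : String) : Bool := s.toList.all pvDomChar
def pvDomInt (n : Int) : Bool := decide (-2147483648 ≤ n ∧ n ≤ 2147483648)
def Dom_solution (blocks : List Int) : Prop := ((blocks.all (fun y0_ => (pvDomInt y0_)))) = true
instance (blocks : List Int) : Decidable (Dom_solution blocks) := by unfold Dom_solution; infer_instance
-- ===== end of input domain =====

-- B replaces A's three passes with two O(n) helper arrays by one forward pass with O(1) state.

-- ===== PORT A =====
-- the forward loop `for i in range(1,N)`: state = (blocks[i-1], right[i-1]), emitting right[i]
def raA (prev c : Int) : List Int → List Int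
  | [] => []
  | y :: ys =>
      let c' := if y ≥ prev then c + 1 else 0
      c' :: raA y c' ys

-- the backward loop `for i in range(N-2,-1,-1)`: left[i] from left[i+1] (head of the already-built tail)
def laA : List Int → List Int
  | [] => []
  | [_] => [0]
  | x :: y :: ys => (if x ≥ y then (laA (y :: ys)).headD 0 + 1 else 0) :: laA (y :: ys)

def solution (blocks : List Int) : Int :=
  let right : List Int := match blocks with
    | [] => []
    | x :: rest => 0 :: raA x 0 rest
  let left : List Int := laA blocks
  -- `for i in range(N): max_distance = max(max_distance, right[i] + left[i] + 1)`
  (List.zip right left).foldl (fun m p => max m (p.1 + p.2 + 1)) 0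

-- ===== PORT B =====
-- the single forward loop of Source B: state = (prev, inc, mnt, best)
def fbB (prev inc mnt best : Int) : List Int → Int
  | [] => best
  | x :: xs =>
      let inc' := if x ≥ prev then inc + 1 else 1
      let mnt' := if x ≤ prev then max inc' (mnt + 1) else inc'
      fbB x inc' mnt' (max best mnt') xs

def solution_alt (blocks : List Int) : Int :=
  match blocks with
  | [] => 0
  | x :: rest => fbB x 1 1 1 rest

-- ===== PRECONDITION & SPEC =====
def Spec_solution (blocks : List Int) (out : Int) : Prop := out = solution_alt blocks
instance (blocks : List Int) (out : Int) : Decidable (Spec_solution blocks out) := by unfold Spec_solution; infer_instance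

-- ===== CLAIM (what is proved, stated in full; the proofs are below) =====
def Claim_equal_solution : Prop := ∀ (blocks : List Int), Dom_solution blocks → Spec_solution blocks (solution blocks)

-- ===== LEMMAS AND PROOFS =====

-- the `left` value at the position holding `prev`, followed by xs
def lval (prev : Int) (xs : List Int) : Int := (laA (prev :: xs)).headD 0

theorem laA_cons (x : Int) (t : List Int) : laA (x :: t) = lval x t :: laA t := by
  cases t <;> simp [laA, lval]

theorem lval_cons (prev x : Int) (t : List Int) :
    lval prev (x :: t) = if prev ≥ x then lval x t + 1 else 0 := by
  simp only [lval, laA, List.headD_cons]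

theorem lval_nonneg : ∀ (xs : List Int) (prev : Int), 0 ≤ lval prev xs := by
  intro xs
  induction xs with
  | nil => intro prev; simp [lval, laA]
  | cons y ys ih =>
      intro prev
      rw [lval_cons]
      have := ih y
      split <;> omega

theorem main_inv : ∀ (xs : List Int) (prev c mnt best : Int),
    0 ≤ c → c + 1 ≤ mnt → mnt ≤ best →
    (List.zip (raA prev c xs) (laA xs)).foldl (fun m p => max m (p.1 + p.2 + 1))
        (max best (mnt + lval prev xs))
      = fbB prev (c + 1) mnt best xs := by
  intro xs
  induction xs with
  | nil =>
      intro prev c mnt best hc hm hb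
      simp only [raA, laA, List.zip_nil_right, List.foldl_nil, fbB]
      have : lval prev [] = 0 := by simp [lval, laA]
      rw [this]
      omega
  | cons x t ih =>
      intro prev c mnt best hc hm hb
      have hL1 : 0 ≤ lval x t := lval_nonneg t x
      rw [laA_cons]
      simp only [raA, fbB, List.zip_cons_cons, List.foldl_cons]
      rw [lval_cons]
      rcases lt_trichotomy x prev with h | h | h
      · -- strict descent: x < prev
        rw [if_neg (by omega : ¬ x ≥ prev), if_pos (by omega : x ≤ prev),
            if_neg (by omega : ¬ x ≥ prev), if_pos (by omega : prev ≥ x)]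
        have hM : max (1 : Int) (mnt + 1) = mnt + 1 := by omega
        have hih := ih x 0 (mnt + 1) (max best (mnt + 1)) (by omega) (by omega) (le_max_right _ _)
        norm_num at hih
        rw [hM, ← hih]
        congr 1
        simp only [max_def]
        split_ifs <;> omega
      · -- equal: x = prev
        subst h
        rw [if_pos (le_refl x), if_pos (le_refl x), if_pos (le_refl x), if_pos (le_refl x)]
        have hM : max (c + 1 + 1) (mnt + 1) = mnt + 1 := by omega
        rw [hM, ← ih x (c + 1) (mnt + 1) (max best (mnt + 1)) (by omega) (by omega) (le_max_right _ _)]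
        congr 1
        simp only [max_def]
        split_ifs <;> omega
      · -- strict ascent: x > prev
        rw [if_pos (by omega : x ≥ prev), if_neg (by omega : ¬ x ≤ prev),
            if_pos (by omega : x ≥ prev), if_neg (by omega : ¬ prev ≥ x)]
        rw [← ih x (c + 1) (c + 1 + 1) (max best (c + 1 + 1)) (by omega) (by omega) (le_max_right _ _)]
        congr 1
        simp only [max_def]
        split_ifs <;> omega

-- ===== VERDICT (by name: the statement is the Claim_ definition above) =====
theorem solution_spec : Claim_equal_solution := by
  intro blocks _
  unfold Spec_solution
  cases blocks with
  | nil => simp [solution, solution_alt, laA]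
  | cons x rest =>
      unfold solution solution_alt
      rw [laA_cons]
      simp only [List.zip_cons_cons, List.foldl_cons]
      have hih := main_inv rest x 0 1 1 (by omega) (by omega) (by omega)
      norm_num at hih
      rw [← hih]
      have hL : 0 ≤ lval x rest := lval_nonneg rest x
      congr 1
      simp only [max_def]
      split_ifs <;> omega
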